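-- pv_equiv track=rewrite | github.com/Arthur-Cassarin-Grand/from-keyword-csv-to-adwords | csv_data.py | clear_string_for_api
-- ===== SOURCE A (Python) =====
-- def clear_string_for_api(text):
--     text = text.replace("’","'")
--     illegal_caracters = [
--         "@",
--         "!",
--         ",",
--         "%",
--         "^",
--         "*",
--         "(",
--         ")",
--         "=",
--         "{",
--         "}",
--         "~",
--         "`",
--         "<",
--         ">",
--         "?",
--         "|"
--     ]
--
--     for illegal_caracter in illegal_caracters:
--         text = text.replace(illegal_caracter, "")
--
--     return text
-- ===== SOURCE B (Python) =====
-- def clear_string_for_api(text):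
--     text = text.replace("’", "'")
--     illegal = {"@", "!", ",", "%", "^", "*", "(", ")", "=", "{", "}", "~", "`", "<", ">", "?", "|"}
--     return "".join(c for c in text if c not in illegal)
-- ===== Notes on version B (the rewrite author's own statement) =====
-- stated objective: idiomatic
-- what changed: Replaced 17 sequential full-string replace() scans (each building a new string) with a single pass over the characters filtering against a set of illegal characters, joining the survivors; the quote normalization stays ahead of the filter.
import Mathlib
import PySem

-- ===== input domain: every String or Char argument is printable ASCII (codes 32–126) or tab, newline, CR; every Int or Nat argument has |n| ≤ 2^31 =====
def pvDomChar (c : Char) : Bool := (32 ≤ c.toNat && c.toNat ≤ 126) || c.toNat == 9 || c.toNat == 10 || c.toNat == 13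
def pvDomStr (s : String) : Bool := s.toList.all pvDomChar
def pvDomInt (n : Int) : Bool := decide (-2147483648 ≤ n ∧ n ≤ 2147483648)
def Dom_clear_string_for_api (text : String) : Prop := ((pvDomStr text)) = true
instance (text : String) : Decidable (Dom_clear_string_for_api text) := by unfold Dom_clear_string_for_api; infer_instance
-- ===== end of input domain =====

-- B replaces A's 17 sequential replace() scans with one filtering pass over the characters; return values proven equal.

-- ===== PORT A =====
def clear_string_for_api (text : String) : String :=
  let text := PySem.Str.replace text "’" "'"
  let illegal_caracters : List String :=
    ["@", "!", ",", "%", "^", "*", "(", ")", "=", "{", "}", "~", "`", "<", ">", "?", "|"]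
  illegal_caracters.foldl (fun t ic => PySem.Str.replace t ic "") text

-- ===== PORT B =====
def pvIllegalSet : List Char :=
  ['@', '!', ',', '%', '^', '*', '(', ')', '=', '{', '}', '~', '`', '<', '>', '?', '|']

def clear_string_for_api_alt (text : String) : String :=
  let t := PySem.Str.replace text "’" "'"
  String.ofList (t.toList.filter (fun c => !(pvIllegalSet.contains c)))

-- ===== PRECONDITION & SPEC =====
def Spec_clear_string_for_api (text : String) (out : String) : Prop := out = clear_string_for_api_alt text
instance (text : String) (out : String) : Decidable (Spec_clear_string_for_api text out) := by unfold Spec_clear_string_for_api; infer_instance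

-- ===== CLAIM (what is proved, stated in full; the proofs are below) =====
def Claim_equal_clear_string_for_api : Prop := ∀ (text : String), Dom_clear_string_for_api text → Spec_clear_string_for_api text (clear_string_for_api text)

-- ===== LEMMAS AND PROOFS =====

-- Deleting every occurrence of a single character is filtering it out.
theorem pv_replace_go_single (c : Char) (fuel : Nat) (l acc : List Char)
    (h : l.length ≤ fuel) :
    PySem.Chars.replace.go [c] [] fuel l acc = acc.reverse ++ l.filter (fun x => x ≠ c) := by
  induction fuel generalizing l acc with
  | zero =>
    have : l = [] := List.length_eq_zero_iff.mp (Nat.le_zero.mp h)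
    subst this
    simp [PySem.Chars.replace.go]
  | succ n ih =>
    cases l with
    | nil => simp [PySem.Chars.replace.go]
    | cons x t =>
      simp only [PySem.Chars.replace.go]
      by_cases hx : x = c
      · subst hx
        have hp : List.isPrefixOf [x] (x :: t) = true := by simp [List.isPrefixOf]
        rw [if_pos hp]
        have := ih t acc (by simpa using Nat.le_of_succ_le_succ h)
        simpa using this
      · have hp : List.isPrefixOf [c] (x :: t) = false := by
          simp only [List.isPrefixOf,
            Bool.and_eq_false_iff, beq_eq_false_iff_ne, ne_eq]
          exact Or.inl fun h => hx h.symm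
        rw [if_neg (by simp [hp])]
        have := ih t (x :: acc) (by simpa using Nat.le_of_succ_le_succ h)
        simpa [hx] using this

theorem pv_replace_single (c : Char) (l : List Char) :
    PySem.Chars.replace l [c] [] = l.filter (fun x => x ≠ c) := by
  simp [PySem.Chars.replace]
  simpa using pv_replace_go_single c l.length l [] (le_refl _)

-- ===== VERDICT (by name: the statement is the Claim_ definition above) =====
theorem clear_string_for_api_spec : Claim_equal_clear_string_for_api := by
  intro text _
  unfold Spec_clear_string_for_api clear_string_for_api clear_string_for_api_alt
  have key : ∀ (s : String) (chars : List Char),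
      (chars.map (fun c => String.ofList [c])).foldl (fun u ic => PySem.Str.replace u ic "") s
        = String.ofList (s.toList.filter (fun x => !(chars.contains x))) := by
    intro s chars
    induction chars generalizing s with
    | nil => simp
    | cons c cs ih =>
      simp only [List.map_cons, List.foldl_cons]
      rw [ih]
      congr 1
      have h1 : (PySem.Str.replace s (String.ofList [c]) "").toList
          = s.toList.filter (fun x => x ≠ c) := by
        rw [PySem.Str.toList_replace]
        simpa using pv_replace_single c s.toList
      rw [h1, List.filter_filter]
      apply List.filter_congr
      intro x _
      by_cases h : x = c <;> simp [h]
  have hlist : (["@", "!", ",", "%", "^", "*", "(", ")", "=", "{", "}", "~", "`", "<", ">", "?", "|"] : List String)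
      = pvIllegalSet.map (fun c => String.ofList [c]) := by decide
  rw [hlist, key]
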